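-- pv_equiv track=rewrite | github.com/Mopchik/Mopchik_alphabet2 | generate_game.py | get_actual_letters
-- ===== SOURCE A (Python) =====
-- def get_actual_letters(level):
--     words_count = len(list(level.keys()))
--     letters = {}
--     for word in level:
--         temp_letters = {}
--         for c in word:
--             if c not in temp_letters:
--                 temp_letters[c] = 1
--             else:
--                 temp_letters[c] += 1
--         for c, count in temp_letters.items():
--             if c not in letters or count > letters[c]:
--                 letters[c] = count
--     actual_letters = []
--     for c, count in letters.items():
--         actual_letters += [c] * count
--     return actual_letters
-- ===== SOURCE B (Python) =====
-- def get_actual_letters(level):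
--     # distinct characters in first-appearance order across the words (dict keys)
--     chars = list(dict.fromkeys(c for word in level for c in word))
--     actual_letters = []
--     for c in chars:
--         actual_letters += [c] * max((word.count(c) for word in level), default=0)
--     return actual_letters
-- ===== Notes on version B (the rewrite author's own statement) =====
-- stated objective: alternative
-- what changed: A builds a per-word Counter dict for each word and merges them into a running max-dict before expanding its items; B first collects the distinct characters in first-appearance order with dict.fromkeys and then computes each character's value directly as max(word.count(c) for word in level), with no dicts of counts at all.
import Mathlib
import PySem

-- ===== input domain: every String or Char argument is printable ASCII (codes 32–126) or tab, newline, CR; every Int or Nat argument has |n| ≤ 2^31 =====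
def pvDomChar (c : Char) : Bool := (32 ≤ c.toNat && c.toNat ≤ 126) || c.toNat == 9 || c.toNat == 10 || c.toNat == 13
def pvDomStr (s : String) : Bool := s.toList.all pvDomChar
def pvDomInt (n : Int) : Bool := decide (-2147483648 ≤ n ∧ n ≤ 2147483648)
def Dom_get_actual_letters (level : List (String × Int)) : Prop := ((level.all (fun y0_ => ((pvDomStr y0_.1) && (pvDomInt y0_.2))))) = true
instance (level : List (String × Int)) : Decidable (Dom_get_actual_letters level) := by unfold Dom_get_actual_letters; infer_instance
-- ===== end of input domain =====

-- B replaces A's per-word counter dicts merged into a running max-dict by a direct two-phase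
-- computation: the distinct characters in first-appearance order, then one max-of-counts scan
-- per character (alternative decomposition, similar cost; no speed claim).


-- ===== PORT A =====
-- A iterates over the dict 'level', i.e. over its keys (the .1 components of the association list).
-- temp_letters loop body: 'if c not in temp_letters: temp_letters[c] = 1 else: temp_letters[c] += 1'
def gaTempStep (t : PySem.Dict Char Int) (c : Char) : PySem.Dict Char Int :=
  if t.contains c = false then t.insert c 1 else t.insert c (t.getD c 0 + 1)

-- merge loop body: 'if c not in letters or count > letters[c]: letters[c] = count'
def gaMergeStep (L : PySem.Dict Char Int) (q : Char × Int) : PySem.Dict Char Int :=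
  if (!L.contains q.1) || decide (L.getD q.1 0 < q.2) then L.insert q.1 q.2 else L

-- 'words_count = len(list(level.keys()))' is computed by A and never used (pure); not ported
def get_actual_letters (level : List (String × Int)) : List String :=
  (level.foldl (fun letters p =>
      (p.1.toList.foldl gaTempStep PySem.Dict.empty).items.foldl gaMergeStep letters)
    PySem.Dict.empty).items.foldl
    (fun acc q => acc ++ PySem.List.pyRepeat [String.ofList [q.1]] q.2) []

-- ===== PORT B =====
-- chars = list(dict.fromkeys(c for word in level for c in word));
-- then for each c: actual_letters += [c] * max((word.count(c) for word in level), default=0)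
def get_actual_letters_alt (level : List (String × Int)) : List String :=
  (PySem.List.dedup (level.flatMap (fun p => p.1.toList))).foldl (fun acc c =>
    acc ++ PySem.List.pyRepeat [String.ofList [c]]
      (PySem.List.maxD (level.map (fun p => (p.1.toList.count c : Int))) (fun x => x) 0)) []

-- ===== PRECONDITION & SPEC =====
def Spec_get_actual_letters (level : List (String × Int)) (out : List String) : Prop := out = get_actual_letters_alt level
instance (level : List (String × Int)) (out : List String) : Decidable (Spec_get_actual_letters level out) := by unfold Spec_get_actual_letters; infer_instance

-- ===== CLAIM (what is proved, stated in full; the proofs are below) =====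
def Claim_equal_get_actual_letters : Prop := ∀ (level : List (String × Int)), Dom_get_actual_letters level → Spec_get_actual_letters level (get_actual_letters level)

-- ===== LEMMAS AND PROOFS =====

-- A's temp_letters loop is Counter(word)
lemma gaTemp_eq_counter (w : List Char) :
    w.foldl gaTempStep PySem.Dict.empty = PySem.Dict.counter w := by
  rw [← PySem.Dict.foldl_insert_getD_add_one_eq_counter]
  apply PySem.List.foldl_congr_mem
  intro t c _
  unfold gaTempStep
  by_cases h : t.contains c = true
  · simp [h]
  · simp only [Bool.not_eq_true] at h
    rw [if_pos (by simp [h]), PySem.Dict.getD_of_not_contains]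
    · norm_num
    · exact h

-- one merge step, on getD
lemma gaMergeStep_getD (L : PySem.Dict Char Int) (k : Char) (v : Int) (hv : 0 ≤ v) (c : Char) :
    (gaMergeStep L (k, v)).getD c 0 = if c = k then max (L.getD c 0) v else L.getD c 0 := by
  unfold gaMergeStep
  by_cases hct : L.contains k = true
  · by_cases hlt : L.getD k 0 < v
    · rw [if_pos (by simp [hlt]), PySem.Dict.getD_insert]
      split_ifs with hck
      · subst hck; omega
      · rfl
    · rw [if_neg (by simp [hct, hlt])]
      split_ifs with hck
      · subst hck; omega
      · rfl
  · simp only [Bool.not_eq_true] at hct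
    rw [if_pos (by simp [hct]), PySem.Dict.getD_insert]
    split_ifs with hck
    · subst hck; rw [PySem.Dict.getD_of_not_contains _ _ hct]; omega
    · rfl

-- one merge step, on keys
lemma gaMergeStep_keys (L : PySem.Dict Char Int) (q : Char × Int) :
    (gaMergeStep L q).keys = PySem.Set.add L.keys q.1 := by
  unfold gaMergeStep
  by_cases hk : q.1 ∈ L.keys
  · rw [PySem.Set.add_of_mem hk]
    split_ifs with h
    · exact PySem.Dict.keys_insert_of_contains _ _ ((PySem.Dict.contains_iff_mem_keys _ _).mpr hk)
    · rfl
  · have hc : L.contains q.1 = false := by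
      by_contra h
      exact hk ((PySem.Dict.contains_iff_mem_keys _ _).mp (by simpa using h))
    rw [if_pos (by simp [hc]), PySem.Dict.keys_insert_of_not_contains _ _ hc,
        PySem.Set.add_of_not_mem hk]

-- keys of the merge fold
lemma gaFold_keys (ps : List (Char × Int)) (L : PySem.Dict Char Int) :
    (ps.foldl gaMergeStep L).keys = PySem.Set.update L.keys (ps.map (·.1)) := by
  induction ps generalizing L with
  | nil => rfl
  | cons q ps ih =>
      simp only [List.foldl_cons, List.map_cons, PySem.Set.update_cons, ih, gaMergeStep_keys]

-- updating a set by a deduped list is updating it by the list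
lemma gaUpdate_ofList (s : PySem.Set Char) (l : List Char) :
    PySem.Set.update s (PySem.Set.ofList l) = PySem.Set.update s l := by
  rw [PySem.Set.update_eq_append_filter, PySem.Set.update_eq_append_filter,
    PySem.Set.ofList_ofList]

-- the running-max fold over a char list, closed form
lemma gaInner_fold (c : Char) (f : Char → Int) (l : List Char) (m : Int) :
    l.foldl (fun m k => if k = c then max m (f k) else m) m
      = if c ∈ l then max m (f c) else m := by
  induction l generalizing m with
  | nil => simp
  | cons k l ih =>
      simp only [List.foldl_cons, List.mem_cons]
      by_cases hk : k = c
      · subst hk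
        simp [ih]
      · simp [hk, ih, Ne.symm hk]

-- shifting the base of the pairwise running-max fold
lemma gaInner_shift (c : Char) (ps : List (Char × Int)) (a : Int) (ha : 0 ≤ a) :
    ps.foldl (fun m p => if p.1 = c then max m p.2 else m) a
      = max a (ps.foldl (fun m p => if p.1 = c then max m p.2 else m) 0) := by
  induction ps generalizing a with
  | nil => simp only [List.foldl_nil]; omega
  | cons p ps ih =>
      simp only [List.foldl_cons]
      by_cases hp : p.1 = c
      · simp only [hp, if_true]
        rw [ih (max a p.2) (by omega), ih (max 0 p.2) (by omega)]
        omega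
      · simp [hp, ih a ha]

-- getD of the merge fold
lemma gaFold_getD (c : Char) (ps : List (Char × Int)) (L : PySem.Dict Char Int)
    (hpos : ∀ p ∈ ps, 0 ≤ p.2) (h0 : 0 ≤ L.getD c 0) :
    (ps.foldl gaMergeStep L).getD c 0
      = max (L.getD c 0) (ps.foldl (fun m p => if p.1 = c then max m p.2 else m) 0) := by
  induction ps generalizing L with
  | nil => simpa using (by omega : max (L.getD c 0) 0 = L.getD c 0).symm
  | cons p ps ih =>
      obtain ⟨k, v⟩ := p
      have hv : 0 ≤ v := hpos (k, v) (by simp)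
      simp only [List.foldl_cons]
      have hstep := gaMergeStep_getD L k v hv c
      rw [ih (gaMergeStep L (k, v)) (fun q hq => hpos q (by simp [hq]))
            (by rw [hstep]; split_ifs <;> omega), hstep]
      by_cases hck : c = k
      · subst hck
        rw [if_pos rfl, if_pos rfl, gaInner_shift c ps (max 0 v) (by omega)]
        omega
      · rw [if_neg hck, if_neg (fun h => hck (h.symm))]

-- merging one word's counter: keys
lemma gaMergeWord_keys (L : PySem.Dict Char Int) (w : List Char) :
    ((PySem.Dict.counter w).items.foldl gaMergeStep L).keys = PySem.Set.update L.keys w := by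
  rw [gaFold_keys, PySem.Dict.items_counter]
  have : (List.map (fun k => (k, (List.count k w : Int))) (PySem.Set.ofList w)).map (·.1)
      = PySem.Set.ofList w := by simp [Function.comp_def]
  rw [this, gaUpdate_ofList]

-- merging one word's counter: getD
lemma gaMergeWord_getD (L : PySem.Dict Char Int) (w : List Char) (c : Char)
    (h0 : 0 ≤ L.getD c 0) :
    ((PySem.Dict.counter w).items.foldl gaMergeStep L).getD c 0
      = max (L.getD c 0) (w.count c) := by
  have hpos : ∀ p ∈ (PySem.Dict.counter w).items, 0 ≤ p.2 := by
    intro p hp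
    rw [PySem.Dict.items_counter] at hp
    simp only [List.mem_map] at hp
    obtain ⟨k, _, rfl⟩ := hp
    positivity
  rw [gaFold_getD c _ L hpos h0, PySem.Dict.items_counter, List.foldl_map]
  have := gaInner_fold c (fun k => (List.count k w : Int)) (PySem.Set.ofList w) 0
  simp only at this
  rw [this]
  by_cases hc : c ∈ w
  · rw [if_pos ((PySem.Set.mem_ofList _ _).mpr hc)]
    omega
  · rw [if_neg (fun h => hc ((PySem.Set.mem_ofList _ _).mp h))]
    have : List.count c w = 0 := List.count_eq_zero.mpr hc
    rw [this]
    simp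

-- keys stay nodup through the merge fold
lemma gaMerge_nodup (ps : List (Char × Int)) (L : PySem.Dict Char Int) (h : L.keys.Nodup) :
    (ps.foldl gaMergeStep L).keys.Nodup := by
  induction ps generalizing L with
  | nil => exact h
  | cons q ps ih =>
      refine ih _ ?_
      unfold gaMergeStep
      split_ifs
      · exact PySem.Dict.nodup_keys_insert _ _ _ h
      · exact h

-- the whole letters-building loop: keys, nodup, and values
lemma gaBuild (level : List (String × Int)) : ∀ (d : PySem.Dict Char Int),
    d.keys.Nodup → (∀ c, 0 ≤ d.getD c 0) →
    (level.foldl (fun letters p =>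
        (PySem.Dict.counter p.1.toList).items.foldl gaMergeStep letters) d).keys
      = PySem.Set.update d.keys (level.flatMap (fun p => p.1.toList))
    ∧ (level.foldl (fun letters p =>
        (PySem.Dict.counter p.1.toList).items.foldl gaMergeStep letters) d).keys.Nodup
    ∧ ∀ c, (level.foldl (fun letters p =>
        (PySem.Dict.counter p.1.toList).items.foldl gaMergeStep letters) d).getD c 0
      = level.foldl (fun m p => max m (p.1.toList.count c)) (d.getD c 0) := by
  induction level with
  | nil => intro d hnd h0; exact ⟨rfl, hnd, fun c => rfl⟩
  | cons p level ih =>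
      intro d hnd h0
      simp only [List.foldl_cons, List.flatMap_cons]
      obtain ⟨hk, hn, hg⟩ := ih ((PySem.Dict.counter p.1.toList).items.foldl gaMergeStep d)
        (gaMerge_nodup _ _ hnd)
        (fun c => by rw [gaMergeWord_getD d _ c (h0 c)]; have := h0 c; omega)
      refine ⟨?_, hn, ?_⟩
      · rw [hk, gaMergeWord_keys, PySem.Set.update_append]
      · intro c
        rw [hg c, gaMergeWord_getD d _ c (h0 c)]

-- max(xs, default=0) of a list of nonnegative ints is the running-max loop from 0
lemma gaMaxD_nonneg (xs : List Int) (h : ∀ x ∈ xs, 0 ≤ x) :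
    PySem.List.maxD xs (fun x => x) 0 = xs.foldl max 0 := by
  cases xs with
  | nil => rfl
  | cons x t =>
      simp only [PySem.List.maxD, PySem.List.max?_id_cons, Option.getD_some, List.foldl_cons]
      have hx : 0 ≤ x := h x (by simp)
      rw [max_eq_right hx]

-- ===== VERDICT (by name: the statement is the Claim_ definition above) =====
theorem get_actual_letters_spec : Claim_equal_get_actual_letters := by
  intro level _
  unfold Spec_get_actual_letters get_actual_letters get_actual_letters_alt
  have hfold : level.foldl (fun letters p =>
        (p.1.toList.foldl gaTempStep PySem.Dict.empty).items.foldl gaMergeStep letters)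
        PySem.Dict.empty
      = level.foldl (fun letters p =>
        (PySem.Dict.counter p.1.toList).items.foldl gaMergeStep letters) PySem.Dict.empty :=
    PySem.List.foldl_congr_mem _ _ _ _ (fun acc p _ => by rw [gaTemp_eq_counter])
  rw [hfold]
  obtain ⟨hk, hn, hg⟩ := gaBuild level PySem.Dict.empty
    (by simp [PySem.Dict.keys_empty]) (fun c => by simp [PySem.Dict.getD_empty])
  rw [PySem.Dict.items_eq_map_keys _ hn 0, List.foldl_map, hk]
  have hdd : PySem.Set.update (PySem.Dict.empty : PySem.Dict Char Int).keys
      (level.flatMap (fun p => p.1.toList))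
      = PySem.List.dedup (level.flatMap (fun p => p.1.toList)) := by
    simp only [PySem.Dict.keys_empty, PySem.List.dedup_eq_ofList]
    exact PySem.Set.update_nil_left _
  rw [hdd]
  apply PySem.List.foldl_congr_mem
  intro acc c _
  rw [hg c]
  have hmaxd := gaMaxD_nonneg (level.map (fun p => (p.1.toList.count c : Int)))
    (by intro x hx; simp only [List.mem_map] at hx; obtain ⟨p, _, rfl⟩ := hx; positivity)
  rw [hmaxd, List.foldl_map]
  have h00 : (PySem.Dict.empty : PySem.Dict Char Int).getD c 0 = 0 := by
    simp [PySem.Dict.getD_empty]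
  rw [h00]
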